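-- pv_equiv track=rewrite | github.com/Mibayy/tsbench | generate.py | py_body_complex
-- ===== SOURCE A (Python) =====
-- def py_body_complex(cyclomatic: int) -> list[str]:
--     """Emit a function body with approximate cyclomatic complexity >= cyclomatic."""
--     lines = ["    result = 0", "    items = list(range(10))"]
--     branches_left = cyclomatic - 1
--     i = 0
--     while branches_left > 0:
--         kind = i % 4
--         if kind == 0:
--             lines.append(f"    if result < {i * 3}:")
--             lines.append(f"        result += {i} + 1")
--             lines.append(f"    else:")
--             lines.append(f"        result -= {i}")
--             branches_left -= 2
--         elif kind == 1:
--             lines.append(f"    for it_{i} in items:")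
--             lines.append(f"        if it_{i} % 2 == 0:")
--             lines.append(f"            result += it_{i}")
--             lines.append(f"        elif it_{i} % 3 == 0:")
--             lines.append(f"            result -= it_{i}")
--             branches_left -= 3
--         elif kind == 2:
--             lines.append(f"    try:")
--             lines.append(f"        result = result * {i + 1}")
--             lines.append(f"    except ValueError:")
--             lines.append(f"        result = -1")
--             lines.append(f"    except KeyError:")
--             lines.append(f"        result = -2")
--             branches_left -= 2
--         else:
--             lines.append(f"    while result < {i * 10}:")
--             lines.append(f"        if result == {i}:")
--             lines.append(f"            break")
--             lines.append(f"        result += 1")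
--             branches_left -= 2
--         i += 1
--     lines.append("    return result")
--     return lines
-- ===== SOURCE B (Python) =====
-- def py_body_complex(cyclomatic: int) -> list[str]:
--     """Two-pass rewrite: first compute the schedule of loop indices, then render."""
--     DEC = {0: 2, 1: 3, 2: 2, 3: 2}
--
--     picks = []
--     branches_left = cyclomatic - 1
--     i = 0
--     while branches_left > 0:
--         picks.append(i)
--         branches_left -= DEC[i % 4]
--         i += 1
--
--     def r0(i):
--         return [f"    if result < {i * 3}:",
--                 f"        result += {i} + 1",
--                 "    else:",
--                 f"        result -= {i}"]
--
--     def r1(i):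
--         return [f"    for it_{i} in items:",
--                 f"        if it_{i} % 2 == 0:",
--                 f"            result += it_{i}",
--                 f"        elif it_{i} % 3 == 0:",
--                 f"            result -= it_{i}"]
--
--     def r2(i):
--         return ["    try:",
--                 f"        result = result * {i + 1}",
--                 "    except ValueError:",
--                 "        result = -1",
--                 "    except KeyError:",
--                 "        result = -2"]
--
--     def r3(i):
--         return [f"    while result < {i * 10}:",
--                 f"        if result == {i}:",
--                 "            break",
--                 "        result += 1"]
--
--     RENDER = {0: r0, 1: r1, 2: r2, 3: r3}
--
--     lines = ["    result = 0", "    items = list(range(10))"]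
--     for i in picks:
--         lines += RENDER[i % 4](i)
--     lines.append("    return result")
--     return lines
-- ===== Notes on version B (the rewrite author's own statement) =====
-- stated objective: alternative
-- what changed: Replaced the single emit-as-you-go while loop by two passes: a small scheduling loop that only tracks branches_left and collects the chosen indices, followed by a rendering pass driven by a dict mapping each kind to a template function.
import Mathlib
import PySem

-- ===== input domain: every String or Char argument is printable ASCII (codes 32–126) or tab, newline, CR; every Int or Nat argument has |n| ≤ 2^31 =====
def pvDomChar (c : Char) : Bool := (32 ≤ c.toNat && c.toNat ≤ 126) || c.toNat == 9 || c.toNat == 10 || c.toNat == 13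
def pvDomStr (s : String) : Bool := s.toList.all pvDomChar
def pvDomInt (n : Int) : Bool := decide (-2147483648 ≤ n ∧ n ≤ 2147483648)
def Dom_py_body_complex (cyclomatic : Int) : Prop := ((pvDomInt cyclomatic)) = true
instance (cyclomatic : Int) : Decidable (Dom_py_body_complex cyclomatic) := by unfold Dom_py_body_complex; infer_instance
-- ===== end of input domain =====

-- B is a two-pass decomposition of A (schedule the indices first, then render via templates); same output, same cost.

-- ===== PORT A =====
-- literal port of A's while loop: state = (lines, branches_left, i)
def pyBodyLoopA (lines : List String) (bl i : Int) : List String :=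
  if bl > 0 then
    if i % 4 = 0 then
      pyBodyLoopA (lines ++
        ["    if result < " ++ PySem.Int.toStr (i * 3) ++ ":",
         "        result += " ++ PySem.Int.toStr i ++ " + 1",
         "    else:",
         "        result -= " ++ PySem.Int.toStr i]) (bl - 2) (i + 1)
    else if i % 4 = 1 then
      pyBodyLoopA (lines ++
        ["    for it_" ++ PySem.Int.toStr i ++ " in items:",
         "        if it_" ++ PySem.Int.toStr i ++ " % 2 == 0:",
         "            result += it_" ++ PySem.Int.toStr i,
         "        elif it_" ++ PySem.Int.toStr i ++ " % 3 == 0:",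
         "            result -= it_" ++ PySem.Int.toStr i]) (bl - 3) (i + 1)
    else if i % 4 = 2 then
      pyBodyLoopA (lines ++
        ["    try:",
         "        result = result * " ++ PySem.Int.toStr (i + 1),
         "    except ValueError:",
         "        result = -1",
         "    except KeyError:",
         "        result = -2"]) (bl - 2) (i + 1)
    else
      pyBodyLoopA (lines ++
        ["    while result < " ++ PySem.Int.toStr (i * 10) ++ ":",
         "        if result == " ++ PySem.Int.toStr i ++ ":",
         "            break",
         "        result += 1"]) (bl - 2) (i + 1)
  else
    lines ++ ["    return result"]
  termination_by bl.toNat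
  decreasing_by all_goals omega

def py_body_complex (cyclomatic : Int) : List String :=
  pyBodyLoopA ["    result = 0", "    items = list(range(10))"] (cyclomatic - 1) 0

-- ===== PORT B =====
-- DEC lookup (keys 0..3; i % 4 is always in 0..3, so the dict lookup never misses)
def pyBodyDec (k : Int) : Int :=
  if k = 0 then 2 else if k = 1 then 3 else if k = 2 then 2 else 2

-- pass 1: the schedule of indices picked by the loop
def pyBodySched (bl i : Int) : List Int :=
  if bl > 0 then i :: pyBodySched (bl - pyBodyDec (i % 4)) (i + 1) else []
  termination_by bl.toNat
  decreasing_by simp [pyBodyDec]; split_ifs <;> omega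

-- pass 2: RENDER templates, one per kind
def pyBodyRender (i : Int) : List String :=
  if i % 4 = 0 then
    ["    if result < " ++ PySem.Int.toStr (i * 3) ++ ":",
     "        result += " ++ PySem.Int.toStr i ++ " + 1",
     "    else:",
     "        result -= " ++ PySem.Int.toStr i]
  else if i % 4 = 1 then
    ["    for it_" ++ PySem.Int.toStr i ++ " in items:",
     "        if it_" ++ PySem.Int.toStr i ++ " % 2 == 0:",
     "            result += it_" ++ PySem.Int.toStr i,
     "        elif it_" ++ PySem.Int.toStr i ++ " % 3 == 0:",
     "            result -= it_" ++ PySem.Int.toStr i]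
  else if i % 4 = 2 then
    ["    try:",
     "        result = result * " ++ PySem.Int.toStr (i + 1),
     "    except ValueError:",
     "        result = -1",
     "    except KeyError:",
     "        result = -2"]
  else
    ["    while result < " ++ PySem.Int.toStr (i * 10) ++ ":",
     "        if result == " ++ PySem.Int.toStr i ++ ":",
     "            break",
     "        result += 1"]

def py_body_complex_alt (cyclomatic : Int) : List String :=
  (((pyBodySched (cyclomatic - 1) 0).foldl
      (fun acc i => acc ++ pyBodyRender i)
      ["    result = 0", "    items = list(range(10))"]))
    ++ ["    return result"]

-- ===== PRECONDITION & SPEC =====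
def Spec_py_body_complex (cyclomatic : Int) (out : List String) : Prop := out = py_body_complex_alt cyclomatic
instance (cyclomatic : Int) (out : List String) : Decidable (Spec_py_body_complex cyclomatic out) := by unfold Spec_py_body_complex; infer_instance

-- ===== CLAIM (what is proved, stated in full; the proofs are below) =====
def Claim_equal_py_body_complex : Prop := ∀ (cyclomatic : Int), Dom_py_body_complex cyclomatic → Spec_py_body_complex cyclomatic (py_body_complex cyclomatic)

-- ===== LEMMAS AND PROOFS =====

theorem pyBodyLoopA_eq (n : Nat) :
    ∀ bl i lines, bl.toNat ≤ n →
      pyBodyLoopA lines bl i =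
        ((pyBodySched bl i).foldl (fun acc j => acc ++ pyBodyRender j) lines)
          ++ ["    return result"] := by
  induction n with
  | zero =>
    intro bl i lines h
    rw [pyBodyLoopA, pyBodySched]
    have : ¬ bl > 0 := by omega
    simp [this]
  | succ n ih =>
    intro bl i lines h
    rw [pyBodyLoopA, pyBodySched]
    by_cases hbl : bl > 0
    · simp only [hbl, if_true, List.foldl_cons]
      by_cases h0 : i % 4 = 0
      · simp only [h0, reduceIte]
        rw [show pyBodyDec (0 : Int) = 2 from rfl, pyBodyRender]
        simp only [h0, Int.reduceEq, reduceIte]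
        exact ih _ _ _ (by omega)
      by_cases h1 : i % 4 = 1
      · simp only [h0, h1, reduceIte]
        rw [show pyBodyDec (1 : Int) = 3 from rfl, pyBodyRender]
        simp only [h0, h1, Int.reduceEq, reduceIte]
        exact ih _ _ _ (by omega)
      by_cases h2 : i % 4 = 2
      · simp only [h0, h1, h2, reduceIte]
        rw [show pyBodyDec (2 : Int) = 2 from rfl, pyBodyRender]
        simp only [h0, h1, h2, Int.reduceEq, reduceIte]
        exact ih _ _ _ (by omega)
      · simp only [h0, h1, h2, reduceIte]
        rw [show pyBodyDec (i % 4) = 2 from by simp [pyBodyDec, h0, h1, h2], pyBodyRender]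
        simp only [h0, h1, h2, Int.reduceEq, reduceIte]
        exact ih _ _ _ (by omega)
    · simp [hbl]

-- ===== VERDICT (by name: the statement is the Claim_ definition above) =====
theorem py_body_complex_spec : Claim_equal_py_body_complex := by
  intro c _
  show py_body_complex c = py_body_complex_alt c
  unfold py_body_complex py_body_complex_alt
  exact pyBodyLoopA_eq (c - 1).toNat (c - 1) 0 _ le_rfl
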